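-- pv_equiv track=rewrite | github.com/jihkang/Sisyphus | src/sisyphus/service.py | _format_subtask_transition
-- ===== SOURCE A (Python) =====
-- def _format_subtask_transition(
--     previous: tuple[tuple[str, object, str | None], ...],
--     current: tuple[tuple[str, object, str | None], ...],
-- ) -> str | None:
--     previous_map = {subtask_id: (status, conformance) for subtask_id, status, conformance in previous}
--     current_map = {subtask_id: (status, conformance) for subtask_id, status, conformance in current}
--     changed: list[str] = []
--     for subtask_id in sorted(set(previous_map) | set(current_map)):
--         previous_state = previous_map.get(subtask_id)
--         current_state = current_map.get(subtask_id)
--         if previous_state == current_state: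
--             continue
--         if previous_state is None:
--             changed.append(f"{subtask_id}:new {current_state[0]} {current_state[1] or '-'}")
--             continue
--         if current_state is None:
--             changed.append(f"{subtask_id}:removed {previous_state[0]} {previous_state[1] or '-'}")
--             continue
--         changed.append(
--             f"{subtask_id}:{previous_state[0]} {previous_state[1] or '-'} -> "
--             f"{current_state[0]} {current_state[1] or '-'}"
--         )
--     if not changed:
--         return None
--     return f"subtask_conformance_changes={', '.join(changed)}"
-- ===== SOURCE B (Python) =====
-- def _format_subtask_transition(previous, current):
--     previous_map = {subtask_id: (status, conformance) for subtask_id, status, conformance in previous}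
--     current_map = {subtask_id: (status, conformance) for subtask_id, status, conformance in current}
--
--     def current_entry(subtask_id, state):
--         previous_state = previous_map.get(subtask_id)
--         if previous_state is None:
--             return (subtask_id, f"{subtask_id}:new {state[0]} {state[1] or '-'}")
--         if previous_state == state:
--             return None
--         return (
--             subtask_id,
--             f"{subtask_id}:{previous_state[0]} {previous_state[1] or '-'} -> "
--             f"{state[0]} {state[1] or '-'}",
--         )
--
--     from_current = [
--         entry
--         for entry in (current_entry(sid, state) for sid, state in current_map.items())
--         if entry is not None
--     ]
--     from_previous = [
--         (sid, f"{sid}:removed {state[0]} {state[1] or '-'}")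
--         for sid, state in previous_map.items()
--         if sid not in current_map
--     ]
--     entries = sorted(from_current + from_previous, key=lambda entry: entry[0])
--     if not entries:
--         return None
--     return "subtask_conformance_changes=" + ", ".join(message for _, message in entries)
-- ===== Notes on version B (the rewrite author's own statement) =====
-- stated objective: alternative
-- what changed: A walks the sorted union of the two key sets once, looking each key up in both dicts and branching; B instead classifies entries per category straight from the dicts' items (new/changed from current_map, removed from previous_map), collects (subtask_id, message) pairs, and sorts that combined list by subtask_id at the end.
import Mathlib
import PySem

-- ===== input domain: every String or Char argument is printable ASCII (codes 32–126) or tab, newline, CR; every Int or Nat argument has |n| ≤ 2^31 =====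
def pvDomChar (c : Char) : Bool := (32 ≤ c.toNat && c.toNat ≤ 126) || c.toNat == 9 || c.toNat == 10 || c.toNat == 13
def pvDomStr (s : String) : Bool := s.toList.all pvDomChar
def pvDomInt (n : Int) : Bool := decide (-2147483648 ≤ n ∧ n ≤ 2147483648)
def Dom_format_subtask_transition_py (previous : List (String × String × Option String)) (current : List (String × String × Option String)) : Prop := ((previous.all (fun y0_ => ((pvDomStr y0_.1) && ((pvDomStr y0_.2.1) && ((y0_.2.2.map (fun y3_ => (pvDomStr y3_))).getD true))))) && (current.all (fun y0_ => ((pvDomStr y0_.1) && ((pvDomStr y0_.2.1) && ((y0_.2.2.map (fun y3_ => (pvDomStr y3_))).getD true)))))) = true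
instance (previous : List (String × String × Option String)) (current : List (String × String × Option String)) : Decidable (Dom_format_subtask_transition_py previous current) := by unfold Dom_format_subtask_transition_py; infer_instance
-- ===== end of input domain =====

-- B replaces A's single loop over the sorted key union by per-category classification of the two
-- dicts' items (new / changed from current, removed from previous) followed by one terminal sort
-- on subtask_id (objective: alternative decomposition, same cost).

-- ===== PORT A =====
-- Python's `value or '-'` on a str|None conformance value (None and "" are falsy)
def pyOrDash (c : Option String) : String :=
  match c with
  | none => "-"
  | some s => if s = "" then "-" else s

def format_subtask_transition_py (previous : List (String × String × Option String)) (current : List (String × String × Option String)) : Option String :=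
  let previous_map := previous.foldl (fun d p => d.insert p.1 (p.2.1, p.2.2)) PySem.Dict.empty
  let current_map := current.foldl (fun d p => d.insert p.1 (p.2.1, p.2.2)) PySem.Dict.empty
  let changed :=
    (PySem.List.sorted ((PySem.Set.ofList previous_map.keys).union (PySem.Set.ofList current_map.keys)) (fun x => x)).foldl
      (fun acc subtask_id =>
        let previous_state := previous_map.get? subtask_id
        let current_state := current_map.get? subtask_id
        if previous_state = current_state then acc
        else
          match previous_state, current_state with
          | none, some c => acc ++ [subtask_id ++ ":new " ++ c.1 ++ " " ++ pyOrDash c.2]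
          | some p, none => acc ++ [subtask_id ++ ":removed " ++ p.1 ++ " " ++ pyOrDash p.2]
          | some p, some c => acc ++ [subtask_id ++ ":" ++ p.1 ++ " " ++ pyOrDash p.2 ++ " -> " ++ c.1 ++ " " ++ pyOrDash c.2]
          | none, none => acc  -- unreachable: both None means previous_state == current_state, handled above
        ) []
  if changed = [] then none
  else some ("subtask_conformance_changes=" ++ PySem.Str.join ", " changed)

-- ===== PORT B =====
def format_subtask_transition_py_alt (previous : List (String × String × Option String)) (current : List (String × String × Option String)) : Option String :=
  let previous_map := previous.foldl (fun d p => d.insert p.1 p.2) PySem.Dict.empty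
  let current_map := current.foldl (fun d p => d.insert p.1 p.2) PySem.Dict.empty
  let current_entry := fun (subtask_id : String) (state : String × Option String) =>
    match previous_map.get? subtask_id with
    | none => some (subtask_id, subtask_id ++ ":new " ++ state.1 ++ " " ++ pyOrDash state.2)
    | some previous_state =>
      if previous_state = state then none
      else some (subtask_id, subtask_id ++ ":" ++ previous_state.1 ++ " " ++ pyOrDash previous_state.2 ++ " -> " ++ state.1 ++ " " ++ pyOrDash state.2)
  let from_current := current_map.items.filterMap (fun p => current_entry p.1 p.2)
  let from_previous := previous_map.items.filterMap (fun p =>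
    if current_map.contains p.1 then none
    else some (p.1, p.1 ++ ":removed " ++ p.2.1 ++ " " ++ pyOrDash p.2.2))
  let entries := PySem.List.sorted (from_current ++ from_previous) (fun e => e.1)
  if entries = [] then none
  else some ("subtask_conformance_changes=" ++ PySem.Str.join ", " (entries.map (fun e => e.2)))

-- ===== PRECONDITION & SPEC =====
def Spec_format_subtask_transition_py (previous : List (String × String × Option String)) (current : List (String × String × Option String)) (out : Option String) : Prop := out = format_subtask_transition_py_alt previous current
instance (previous : List (String × String × Option String)) (current : List (String × String × Option String)) (out : Option String) : Decidable (Spec_format_subtask_transition_py previous current out) := by unfold Spec_format_subtask_transition_py; infer_instance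

-- ===== CLAIM (what is proved, stated in full; the proofs are below) =====
def Claim_equal_format_subtask_transition_py : Prop := ∀ (previous : List (String × String × Option String)) (current : List (String × String × Option String)), Dom_format_subtask_transition_py previous current → Spec_format_subtask_transition_py previous current (format_subtask_transition_py previous current)

-- ===== LEMMAS AND PROOFS =====

-- the map both Pythons build ({sid: (status, conformance)}; duplicates keep-last, first position)
def pvMapOf (l : List (String × String × Option String)) : PySem.Dict String (String × Option String) :=
  l.foldl (fun d p => d.insert p.1 p.2) PySem.Dict.empty

-- the message A's loop emits for one subtask_id (none = skipped)
def pvMsgOf (pm cm : PySem.Dict String (String × Option String)) (sid : String) : Option String :=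
  if pm.get? sid = cm.get? sid then none
  else
    match pm.get? sid, cm.get? sid with
    | none, some c => some (sid ++ ":new " ++ c.1 ++ " " ++ pyOrDash c.2)
    | some p, none => some (sid ++ ":removed " ++ p.1 ++ " " ++ pyOrDash p.2)
    | some p, some c => some (sid ++ ":" ++ p.1 ++ " " ++ pyOrDash p.2 ++ " -> " ++ c.1 ++ " " ++ pyOrDash c.2)
    | none, none => none

def pvEntryOf (pm cm : PySem.Dict String (String × Option String)) (sid : String) : Option (String × String) :=
  (pvMsgOf pm cm sid).map (fun m => (sid, m))

lemma pvMapOf_keys_nodup (l : List (String × String × Option String)) : (pvMapOf l).keys.Nodup := by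
  have h := PySem.Dict.keys_foldl_insert_key (ν := String × Option String) l (fun p => p.1)
      (fun _ p => p.2) PySem.Dict.empty
  unfold pvMapOf
  rw [show (fun (d : PySem.Dict String (String × Option String)) (p : String × String × Option String) => d.insert p.1 p.2) = (fun d x => d.insert ((fun p => p.1) x) ((fun _ p => p.2) d x)) from rfl, h]
  simp [PySem.Dict.keys_empty, PySem.Set.update_nil_left, PySem.Set.nodup_ofList]

lemma pvFoldA (pm cm : PySem.Dict String (String × Option String)) (S : List String) (acc : List String) :
    S.foldl
      (fun acc subtask_id =>
        let previous_state := pm.get? subtask_id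
        let current_state := cm.get? subtask_id
        if previous_state = current_state then acc
        else
          match previous_state, current_state with
          | none, some c => acc ++ [subtask_id ++ ":new " ++ c.1 ++ " " ++ pyOrDash c.2]
          | some p, none => acc ++ [subtask_id ++ ":removed " ++ p.1 ++ " " ++ pyOrDash p.2]
          | some p, some c => acc ++ [subtask_id ++ ":" ++ p.1 ++ " " ++ pyOrDash p.2 ++ " -> " ++ c.1 ++ " " ++ pyOrDash c.2]
          | none, none => acc) acc
      = acc ++ S.filterMap (pvMsgOf pm cm) := by
  induction S generalizing acc with
  | nil => simp
  | cons s t ih =>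
    have hstep : ∀ acc : List String,
        (let previous_state := pm.get? s
         let current_state := cm.get? s
         if previous_state = current_state then acc
         else
          match previous_state, current_state with
          | none, some c => acc ++ [s ++ ":new " ++ c.1 ++ " " ++ pyOrDash c.2]
          | some p, none => acc ++ [s ++ ":removed " ++ p.1 ++ " " ++ pyOrDash p.2]
          | some p, some c => acc ++ [s ++ ":" ++ p.1 ++ " " ++ pyOrDash p.2 ++ " -> " ++ c.1 ++ " " ++ pyOrDash c.2]
          | none, none => acc) = acc ++ (pvMsgOf pm cm s).toList := by
      intro acc
      by_cases h : pm.get? s = cm.get? s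
      · simp [pvMsgOf, h]
      · cases hp : pm.get? s <;> cases hc : cm.get? s <;>
          simp [pvMsgOf, hp, hc] at h ⊢ <;> simp [h]
    simp only [List.foldl_cons, List.filterMap_cons]
    rw [hstep]
    cases hm : pvMsgOf pm cm s <;> simp [ih, hm]

lemma pvFilterMap_if {α β : Type} (p : α → Bool) (f : α → Option β) (l : List α) :
    l.filterMap (fun x => if p x then none else f x) = (l.filter (fun x => !p x)).filterMap f := by
  induction l with
  | nil => simp
  | cons a t ih =>
    cases hp : p a <;> cases hf : f a <;> simp [List.filter_cons, List.filterMap_cons, hp, hf, ih]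

lemma pvCore (pm cm : PySem.Dict String (String × Option String))
    (hp : pm.keys.Nodup) (hc : cm.keys.Nodup) :
    (let changed :=
      (PySem.List.sorted ((PySem.Set.ofList pm.keys).union (PySem.Set.ofList cm.keys)) (fun x => x)).foldl
        (fun acc subtask_id =>
          let previous_state := pm.get? subtask_id
          let current_state := cm.get? subtask_id
          if previous_state = current_state then acc
          else
            match previous_state, current_state with
            | none, some c => acc ++ [subtask_id ++ ":new " ++ c.1 ++ " " ++ pyOrDash c.2]
            | some p, none => acc ++ [subtask_id ++ ":removed " ++ p.1 ++ " " ++ pyOrDash p.2]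
            | some p, some c => acc ++ [subtask_id ++ ":" ++ p.1 ++ " " ++ pyOrDash p.2 ++ " -> " ++ c.1 ++ " " ++ pyOrDash c.2]
            | none, none => acc) []
     if changed = [] then none
     else some ("subtask_conformance_changes=" ++ PySem.Str.join ", " changed))
    =
    (let current_entry := fun (subtask_id : String) (state : String × Option String) =>
        match pm.get? subtask_id with
        | none => some (subtask_id, subtask_id ++ ":new " ++ state.1 ++ " " ++ pyOrDash state.2)
        | some previous_state =>
          if previous_state = state then none
          else some (subtask_id, subtask_id ++ ":" ++ previous_state.1 ++ " " ++ pyOrDash previous_state.2 ++ " -> " ++ state.1 ++ " " ++ pyOrDash state.2)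
     let from_current := cm.items.filterMap (fun p => current_entry p.1 p.2)
     let from_previous := pm.items.filterMap (fun p =>
        if cm.contains p.1 then none
        else some (p.1, p.1 ++ ":removed " ++ p.2.1 ++ " " ++ pyOrDash p.2.2))
     let entries := PySem.List.sorted (from_current ++ from_previous) (fun e => e.1)
     if entries = [] then none
     else some ("subtask_conformance_changes=" ++ PySem.Str.join ", " (entries.map (fun e => e.2)))) := by
  -- abbreviations
  set U := (PySem.Set.ofList pm.keys).union (PySem.Set.ofList cm.keys) with hU
  set S := PySem.List.sorted U (fun x => x) with hS
  set E := S.filterMap (pvEntryOf pm cm) with hE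
  -- A's loop
  rw [pvFoldA pm cm S []]
  simp only [List.nil_append]
  -- B's from_current over items = filterMap pvEntryOf over cm.keys
  have hfc : cm.items.filterMap (fun p =>
      match pm.get? p.1 with
      | none => some (p.1, p.1 ++ ":new " ++ p.2.1 ++ " " ++ pyOrDash p.2.2)
      | some previous_state =>
        if previous_state = p.2 then none
        else some (p.1, p.1 ++ ":" ++ previous_state.1 ++ " " ++ pyOrDash previous_state.2 ++ " -> " ++ p.2.1 ++ " " ++ pyOrDash p.2.2))
      = cm.keys.filterMap (pvEntryOf pm cm) := by
    have h1 : ∀ p ∈ cm.items,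
        (match pm.get? p.1 with
         | none => some (p.1, p.1 ++ ":new " ++ p.2.1 ++ " " ++ pyOrDash p.2.2)
         | some previous_state =>
           if previous_state = p.2 then none
           else some (p.1, p.1 ++ ":" ++ previous_state.1 ++ " " ++ pyOrDash previous_state.2 ++ " -> " ++ p.2.1 ++ " " ++ pyOrDash p.2.2))
        = pvEntryOf pm cm p.1 := by
      intro p hpmem
      have hget : cm.get? p.1 = some p.2 := by
        rw [PySem.Dict.get?_eq_some_iff_mem_items cm p.1 p.2 hc]; exact hpmem
      unfold pvEntryOf pvMsgOf
      rw [hget]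
      cases hg : pm.get? p.1 with
      | none => simp
      | some q =>
        by_cases hq : q = p.2
        · simp [hq]
        · simp [hq, Option.some_inj]
    calc cm.items.filterMap _ = cm.items.filterMap (fun p => pvEntryOf pm cm p.1) :=
          List.filterMap_congr h1
      _ = (cm.items.map (fun p => p.1)).filterMap (pvEntryOf pm cm) := by
          rw [List.filterMap_map]; rfl
      _ = cm.keys.filterMap (pvEntryOf pm cm) := rfl
  -- B's from_previous over items = filterMap over pm.keys with the not-in-current guard
  have hfp : pm.items.filterMap (fun p =>
      if cm.contains p.1 then none
      else some (p.1, p.1 ++ ":removed " ++ p.2.1 ++ " " ++ pyOrDash p.2.2))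
      = (pm.keys.filter (fun k => !cm.contains k)).filterMap (pvEntryOf pm cm) := by
    have h1 : ∀ p ∈ pm.items,
        (if cm.contains p.1 then none
         else some (p.1, p.1 ++ ":removed " ++ p.2.1 ++ " " ++ pyOrDash p.2.2))
        = (if cm.contains p.1 then none else pvEntryOf pm cm p.1) := by
      intro p hpmem
      have hget : pm.get? p.1 = some p.2 := by
        rw [PySem.Dict.get?_eq_some_iff_mem_items pm p.1 p.2 hp]; exact hpmem
      by_cases hcont : cm.contains p.1
      · simp [hcont]
      · have hcget : cm.get? p.1 = none := by
          rw [PySem.Dict.get?_eq_none_iff_not_mem_keys]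
          intro hmem
          exact hcont ((PySem.Dict.contains_iff_mem_keys cm p.1).mpr hmem)
        simp only [hcont, if_neg, Bool.false_eq_true, not_false_eq_true, if_false]
        unfold pvEntryOf pvMsgOf
        rw [hget, hcget]
        simp
    calc pm.items.filterMap _
        = pm.items.filterMap (fun p => if cm.contains p.1 then none else pvEntryOf pm cm p.1) :=
          List.filterMap_congr h1
      _ = (pm.items.map (fun p => p.1)).filterMap (fun k => if cm.contains k then none else pvEntryOf pm cm k) := by
          rw [List.filterMap_map]; rfl
      _ = (pm.keys.filterMap (fun k => if cm.contains k then none else pvEntryOf pm cm k)) := rfl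
      _ = (pm.keys.filter (fun k => !cm.contains k)).filterMap (pvEntryOf pm cm) :=
          pvFilterMap_if _ _ _
  rw [hfc, hfp]
  -- the union key list is a permutation of cm.keys ++ (pm.keys not in cm)
  have hperm : U.Perm (cm.keys ++ pm.keys.filter (fun k => !cm.contains k)) := by
    have hUnodup : U.Nodup := PySem.Set.nodup_union _ _ (PySem.Set.nodup_ofList _)
    have hdisj : List.Disjoint cm.keys (pm.keys.filter (fun k => !cm.contains k)) := by
      intro x hx hx'
      rw [List.mem_filter, Bool.not_eq_true'] at hx'
      exact absurd ((PySem.Dict.contains_iff_mem_keys cm x).mpr hx) (by simp [hx'.2])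
    have hRnodup : (cm.keys ++ pm.keys.filter (fun k => !cm.contains k)).Nodup :=
      List.Nodup.append hc (hp.filter _) hdisj
    rw [List.perm_ext_iff_of_nodup hUnodup hRnodup]
    intro a
    rw [hU]
    rw [PySem.Set.mem_union, PySem.Set.mem_ofList, PySem.Set.mem_ofList, List.mem_append,
      List.mem_filter]
    constructor
    · rintro (hpa | hca)
      · by_cases hcc : cm.contains a
        · exact Or.inl ((PySem.Dict.contains_iff_mem_keys cm a).mp hcc)
        · exact Or.inr ⟨hpa, by simp [hcc]⟩
      · exact Or.inl hca
    · rintro (hca | ⟨hpa, _⟩)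
      · exact Or.inr hca
      · exact Or.inl hpa
  -- B's sorted entry list is exactly E
  have hEperm : E.Perm (cm.keys.filterMap (pvEntryOf pm cm) ++ (pm.keys.filter (fun k => !cm.contains k)).filterMap (pvEntryOf pm cm)) := by
    rw [← List.filterMap_append]
    exact ((PySem.List.sorted_perm U (fun x => x) false).filterMap _).trans (hperm.filterMap _)
  have hEpair : E.Pairwise (fun a b => a.1 < b.1) := by
    rw [hE, List.pairwise_filterMap]
    have hSnodup : S.Nodup := ((PySem.List.sorted_perm U (fun x => x) false).nodup_iff).mpr
      (PySem.Set.nodup_union _ _ (PySem.Set.nodup_ofList _))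
    have hSle : S.Pairwise (fun a b => a ≤ b) := PySem.List.sorted_pairwise U (fun x => x)
    have hSlt : S.Pairwise (fun a b => a < b) := (hSnodup.and hSle).imp
      (fun h => lt_of_le_of_ne h.2 h.1)
    refine hSlt.imp ?_
    intro a b hab x hx y hy
    have hxa : x.1 = a := by
      unfold pvEntryOf at hx
      cases hm : pvMsgOf pm cm a <;> rw [hm] at hx <;> simp at hx
      rw [← hx]
    have hyb : y.1 = b := by
      unfold pvEntryOf at hy
      cases hm : pvMsgOf pm cm b <;> rw [hm] at hy <;> simp at hy
      rw [← hy]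
    rw [hxa, hyb]; exact hab
  have hsorted : PySem.List.sorted (cm.keys.filterMap (pvEntryOf pm cm) ++ (pm.keys.filter (fun k => !cm.contains k)).filterMap (pvEntryOf pm cm)) (fun e => e.1) = E :=
    PySem.List.sorted_eq_of_perm_of_pairwise_lt _ E (fun e => e.1) hEperm hEpair
  rw [hsorted]
  -- messages of E are exactly A's changed list
  have hmap : E.map (fun e => e.2) = S.filterMap (pvMsgOf pm cm) := by
    rw [hE, List.map_filterMap]
    refine List.filterMap_congr ?_
    intro a _
    unfold pvEntryOf
    cases pvMsgOf pm cm a <;> simp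
  rw [hmap]
  -- both empties coincide
  have hiff : S.filterMap (pvMsgOf pm cm) = [] ↔ E = [] := by
    rw [← hmap]; exact List.map_eq_nil_iff
  by_cases h : E = []
  · rw [if_pos (hiff.mpr h), if_pos h]
  · rw [if_neg (fun hh => h (hiff.mp hh)), if_neg h]

-- ===== VERDICT (by name: the statement is the Claim_ definition above) =====
theorem format_subtask_transition_py_spec : Claim_equal_format_subtask_transition_py := by
  intro previous current _
  unfold Spec_format_subtask_transition_py
  show format_subtask_transition_py previous current = format_subtask_transition_py_alt previous current
  have hA : format_subtask_transition_py previous current =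
      (let pm := pvMapOf previous
       let cm := pvMapOf current
       let changed :=
        (PySem.List.sorted ((PySem.Set.ofList pm.keys).union (PySem.Set.ofList cm.keys)) (fun x => x)).foldl
          (fun acc subtask_id =>
            let previous_state := pm.get? subtask_id
            let current_state := cm.get? subtask_id
            if previous_state = current_state then acc
            else
              match previous_state, current_state with
              | none, some c => acc ++ [subtask_id ++ ":new " ++ c.1 ++ " " ++ pyOrDash c.2]
              | some p, none => acc ++ [subtask_id ++ ":removed " ++ p.1 ++ " " ++ pyOrDash p.2]
              | some p, some c => acc ++ [subtask_id ++ ":" ++ p.1 ++ " " ++ pyOrDash p.2 ++ " -> " ++ c.1 ++ " " ++ pyOrDash c.2]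
              | none, none => acc) []
       if changed = [] then none
       else some ("subtask_conformance_changes=" ++ PySem.Str.join ", " changed)) := rfl
  have hB : format_subtask_transition_py_alt previous current =
      (let pm := pvMapOf previous
       let cm := pvMapOf current
       let current_entry := fun (subtask_id : String) (state : String × Option String) =>
          match pm.get? subtask_id with
          | none => some (subtask_id, subtask_id ++ ":new " ++ state.1 ++ " " ++ pyOrDash state.2)
          | some previous_state =>
            if previous_state = state then none
            else some (subtask_id, subtask_id ++ ":" ++ previous_state.1 ++ " " ++ pyOrDash previous_state.2 ++ " -> " ++ state.1 ++ " " ++ pyOrDash state.2)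
       let from_current := cm.items.filterMap (fun p => current_entry p.1 p.2)
       let from_previous := pm.items.filterMap (fun p =>
          if cm.contains p.1 then none
          else some (p.1, p.1 ++ ":removed " ++ p.2.1 ++ " " ++ pyOrDash p.2.2))
       let entries := PySem.List.sorted (from_current ++ from_previous) (fun e => e.1)
       if entries = [] then none
       else some ("subtask_conformance_changes=" ++ PySem.Str.join ", " (entries.map (fun e => e.2)))) := rfl
  rw [hA, hB]
  exact pvCore (pvMapOf previous) (pvMapOf current) (pvMapOf_keys_nodup previous) (pvMapOf_keys_nodup current)
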